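-- pv_equiv track=rewrite | github.com/kukuhua1/alg_practice | subject_list/爱心蔬菜配送最短时间.py | min_delivery_hours
-- ===== SOURCE A (Python) =====
-- def min_delivery_hours(num, communities):
--     """
--     返回完成所有社区配送所需的最短小时数。
--
--     你平时只需要修改这个函数里的算法即可，下面的 OJ 输入输出和测试框架可以直接复用。
--     当前提供的是可通过该题的参考实现。
--     """
--     if not communities:
--         return 0
--
--     left = max(communities)
--     right = sum(communities)
--
--     def can_finish_within(limit):
--         volunteers_used = 1
--         current_sum = 0
--
--         for families in communities:
--             if current_sum + families <= limit:
--                 current_sum += families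
--             else:
--                 volunteers_used += 1
--                 current_sum = families
--                 if volunteers_used > num:
--                     return False
--
--         return True
--
--     while left < right:
--         mid = (left + right) // 2
--         if can_finish_within(mid):
--             right = mid
--         else:
--             left = mid + 1
--
--     return left
-- ===== SOURCE B (Python) =====
-- def min_delivery_hours(num, communities):
--     if not communities:
--         return 0
--     n = len(communities)
--     prefix = [0]
--     for c in communities:
--         prefix.append(prefix[-1] + c)
--     k = min(max(num, 1), n)
--     dp = list(prefix)  # k = 1 row: dp[i] = sum of the first i communities
--     for _ in range(k - 1):
--         dp = [min([max(dp[j], prefix[i] - prefix[j]) for j in range(i + 1)])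
--               for i in range(n + 1)]
--     return dp[n]
-- ===== Notes on version B (the rewrite author's own statement) =====
-- stated objective: alternative
-- what changed: Replaces binary search on the answer with a greedy feasibility check by a bottom-up prefix-sum partition DP (dp[i] after t rounds = minimal largest group sum splitting the first i communities into t+1 groups).
-- outside the precondition, e.g. on min_delivery_hours(1, [-2, 3]): A returns 3, B returns 1
import Mathlib
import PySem

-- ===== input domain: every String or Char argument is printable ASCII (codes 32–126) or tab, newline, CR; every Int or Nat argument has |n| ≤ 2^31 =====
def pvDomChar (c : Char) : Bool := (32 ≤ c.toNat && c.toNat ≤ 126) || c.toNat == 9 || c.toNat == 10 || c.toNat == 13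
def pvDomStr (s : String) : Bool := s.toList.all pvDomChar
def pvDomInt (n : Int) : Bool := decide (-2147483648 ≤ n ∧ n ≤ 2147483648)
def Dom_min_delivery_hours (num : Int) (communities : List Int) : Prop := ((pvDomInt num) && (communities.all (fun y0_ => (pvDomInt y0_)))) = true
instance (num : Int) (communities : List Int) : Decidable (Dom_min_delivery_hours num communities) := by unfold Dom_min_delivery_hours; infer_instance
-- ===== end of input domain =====

-- B replaces A's binary search on the answer by a pfxs-sum partition DP (alternative algorithm, same values).

-- ===== PORT A =====
-- the inner closure can_finish_within(limit): fold over communities with state (volunteers_used, current_sum)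
def canFinishAux (num limit : Int) : List Int → Int → Int → Bool
  | [], _, _ => true
  | f :: rest, used, cur =>
    if cur + f ≤ limit then canFinishAux num limit rest used (cur + f)
    else if used + 1 > num then false
    else canFinishAux num limit rest (used + 1) f

-- the `while left < right` binary-search loop
def bsearchA (num : Int) (communities : List Int) (left right : Int) : Int :=
  if h : left < right then
    let mid := PySem.Int.floordiv (left + right) 2
    if canFinishAux num mid communities 1 0 then bsearchA num communities left mid
    else bsearchA num communities (mid + 1) right
  else left
termination_by (right - left).toNat
decreasing_by
  · have h1 := (PySem.Int.floordiv_lt_iff_lt_mul (a := left + right) (b := 2) (q := right) (by norm_num)).2 (by omega)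
    have h2 := (PySem.Int.le_floordiv_iff_mul_le (a := left + right) (b := 2) (q := left) (by norm_num)).2 (by omega)
    omega
  · have h1 := (PySem.Int.floordiv_lt_iff_lt_mul (a := left + right) (b := 2) (q := right) (by norm_num)).2 (by omega)
    have h2 := (PySem.Int.le_floordiv_iff_mul_le (a := left + right) (b := 2) (q := left) (by norm_num)).2 (by omega)
    omega

def min_delivery_hours (num : Int) (communities : List Int) : Int :=
  if communities = [] then 0
  else
    let left := (PySem.List.max? communities (fun x => x)).getD 0   -- max(communities); list nonempty here
    let right := communities.sum
    bsearchA num communities left right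

-- ===== PORT B =====
-- pfxs = [0]; for c in communities: pfxs.append(pfxs[-1] + c)
def buildPrefix (communities : List Int) : List Int :=
  communities.foldl (fun p c => p ++ [PySem.List.pyGetD p (-1) 0 + c]) [0]

-- one DP round: dp = [min([max(dp[j], pfxs[i]-pfxs[j]) for j in range(i+1)]) for i in range(n+1)]
def dpRow (pfxs : List Int) (n : Int) (dp : List Int) : List Int :=
  (PySem.List.pyRange 0 (n + 1)).map (fun i =>
    ((PySem.List.min? ((PySem.List.pyRange 0 (i + 1)).map (fun j =>
        max (PySem.List.pyGetD dp j 0)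
            (PySem.List.pyGetD pfxs i 0 - PySem.List.pyGetD pfxs j 0))) (fun x => x)).getD 0))

def min_delivery_hours_alt (num : Int) (communities : List Int) : Int :=
  if communities = [] then 0
  else
    let n : Int := communities.length
    let pfxs := buildPrefix communities
    let k := min (max num 1) n
    let dp := (PySem.List.pyRange 0 (k - 1)).foldl (fun dp _ => dpRow pfxs n dp) pfxs
    PySem.List.pyGetD dp n 0

-- ===== PRECONDITION & SPEC =====
-- Pre_ excludes lists containing a negative community size: family counts are naturally nonnegative,
-- and on negative inputs A's binary-search bracket [max, sum] is an accident of its implementation.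
def Pre_min_delivery_hours (num : Int) (communities : List Int) : Prop :=
  ∀ c ∈ communities, 0 ≤ c
instance (num : Int) (communities : List Int) : Decidable (Pre_min_delivery_hours num communities) := by
  unfold Pre_min_delivery_hours; infer_instance

def pvWitness_min_delivery_hours : Int × List Int := (2, [3, 1, 2])

def Spec_min_delivery_hours (num : Int) (communities : List Int) (out : Int) : Prop := out = min_delivery_hours_alt num communities
instance (num : Int) (communities : List Int) (out : Int) : Decidable (Spec_min_delivery_hours num communities out) := by unfold Spec_min_delivery_hours; infer_instance

-- ===== CLAIM (what is proved, stated in full; the proofs are below) =====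
def Claim_equal_min_delivery_hours : Prop := ∀ (num : Int) (communities : List Int), Dom_min_delivery_hours num communities → Pre_min_delivery_hours num communities → Spec_min_delivery_hours num communities (min_delivery_hours num communities)

-- ===== LEMMAS AND PROOFS =====

-- number of times the greedy (limit-capacity) scan closes the current group and starts a new one
def breaks (limit : Int) : List Int → Int → Nat
  | [], _ => 0
  | f :: rest, cur => if cur + f ≤ limit then breaks limit rest (cur + f) else breaks limit rest f + 1

-- "X splits into ≤ k contiguous groups, each of sum ≤ m" (last group peeled off first)
def PB : Nat → List Int → Int → Prop
  | 0, X, _ => X = []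
  | k+1, X, m => ∃ j ≤ X.length, PB k (X.take j) m ∧ (X.drop j).sum ≤ m

-- mathematical value of the DP: V t X = minimal largest group sum splitting X into t+1 groups
def V : Nat → List Int → Int
  | 0, X => X.sum
  | t+1, X => (PySem.List.min? ((List.range (X.length + 1)).map
      (fun j => max (V t (X.take j)) ((X.drop j).sum))) (fun x => x)).getD 0

theorem breaks_mono_reset (limit limit' : Int) (l : List Int) (hl : ∀ c ∈ l, 0 ≤ c)
    (hlim : limit ≤ limit') :
    (∀ c c' : Int, 0 ≤ c' → c' ≤ c → breaks limit' l c' ≤ breaks limit l c) ∧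
    (∀ x y : Int, 0 ≤ y → y ≤ x → breaks limit' l x ≤ breaks limit l y + 1) := by
  induction l with
  | nil => simp [breaks]
  | cons f rest ih =>
    have hf : 0 ≤ f := hl f (by simp)
    obtain ⟨ihM, ihR⟩ := ih (fun c hc => hl c (by simp [hc]))
    constructor
    · intro c c' hc' hcc
      simp only [breaks]
      split_ifs with h1 h2 h2
      · exact ihM (c + f) (c' + f) (by omega) (by omega)
      · have := ihR (c' + f) f hf (by omega); omega
      · omega
      · have := ihM f f hf le_rfl; omega
    · intro x y hy hyx
      simp only [breaks]
      split_ifs with h1 h2 h2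
      · exact ihR (x + f) (y + f) (by omega) (by omega)
      · have := ihR (x + f) f hf (by omega); omega
      · have := ihM (y + f) f hf (by omega); omega
      · have := ihM f f hf le_rfl; omega

theorem breaks_eq_zero (m : Int) (l : List Int) (cur : Int) (hl : ∀ c ∈ l, 0 ≤ c)
    (hc : 0 ≤ cur) (hs : cur + l.sum ≤ m) : breaks m l cur = 0 := by
  induction l generalizing cur with
  | nil => simp [breaks]
  | cons f rest ih =>
    have hf : 0 ≤ f := hl f (by simp)
    have hr : (0:Int) ≤ rest.sum := List.sum_nonneg (fun c hc => hl c (by simp [hc]))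
    simp only [List.sum_cons] at hs
    have hfit : cur + f ≤ m := by omega
    simp only [breaks, if_pos hfit]
    exact ih (cur + f) (fun c hc => hl c (by simp [hc])) (by omega) (by omega)

theorem breaks_suffix (m : Int) (Y Z : List Int) (cur : Int)
    (hY : ∀ c ∈ Y, 0 ≤ c) (hZ : ∀ c ∈ Z, 0 ≤ c) (hc : 0 ≤ cur) (hZs : Z.sum ≤ m) :
    breaks m (Y ++ Z) cur ≤ breaks m Y cur + 1 := by
  induction Y generalizing cur with
  | nil =>
    simp only [List.nil_append, breaks]
    have h0 : breaks m Z 0 = 0 := breaks_eq_zero m Z 0 hZ le_rfl (by simpa using hZs)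
    have := (breaks_mono_reset m m Z hZ le_rfl).2 cur 0 le_rfl hc
    omega
  | cons y Y' ih =>
    have hy : 0 ≤ y := hY y (by simp)
    simp only [List.cons_append, breaks]
    split_ifs with h1
    · exact ih (cur + y) (fun c hc => hY c (by simp [hc])) (by omega)
    · have := ih y (fun c hc => hY c (by simp [hc])) hy
      omega

theorem canFinishAux_eq (num limit : Int) (l : List Int) :
    ∀ used cur : Int, canFinishAux num limit l used cur =
      decide (used + (breaks limit l cur : Int) ≤ num ∨ breaks limit l cur = 0) := by
  induction l with
  | nil => intro used cur; simp [canFinishAux, breaks]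
  | cons f rest ih =>
    intro used cur
    simp only [canFinishAux, breaks]
    split_ifs with h1 h2 _h3
    · exact ih used (cur + f)
    · symm; simp only [decide_eq_false_iff_not]
      rintro (hle | hz)
      · push_cast at hle; omega
      · omega
    · rw [ih (used + 1) f]
      simp only [decide_eq_decide]
      push_cast
      simp only [or_false]
      omega

theorem PB_mono_m {k : Nat} {X : List Int} {m m' : Int} (h : PB k X m) (hm : m ≤ m') : PB k X m' := by
  induction k generalizing X with
  | zero => exact h
  | succ k ih =>
    obtain ⟨j, hj, hPB, hd⟩ := h
    exact ⟨j, hj, ih hPB, le_trans hd hm⟩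

theorem PB_mono_k {k k' : Nat} {X : List Int} {m : Int} (hm : 0 ≤ m) (hk : k ≤ k') (h : PB k X m) :
    PB k' X m := by
  induction k' with
  | zero => simpa [Nat.le_zero.1 hk] using h
  | succ k' ih =>
    rcases Nat.lt_or_ge k (k' + 1) with hlt | hge
    · have hPB : PB k' X m := ih (by omega)
      exact ⟨X.length, le_rfl, by simpa [List.take_length] using hPB, by simpa using hm⟩
    · have : k = k' + 1 := by omega
      subst this; exact h

theorem mem_le_sum {X : List Int} (hX : ∀ c ∈ X, 0 ≤ c) {c : Int} (hc : c ∈ X) : c ≤ X.sum := by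
  induction X with
  | nil => cases hc
  | cons x t ih =>
    have ht : (0:Int) ≤ t.sum := List.sum_nonneg (fun a ha => hX a (by simp [ha]))
    rcases List.mem_cons.1 hc with rfl | hc'
    · simp only [List.sum_cons]; omega
    · have := ih (fun a ha => hX a (by simp [ha])) hc'
      have hx : 0 ≤ x := hX x (by simp)
      simp only [List.sum_cons]; omega

theorem PB_elem_le {k : Nat} {X : List Int} {m : Int} (h : PB k X m) (hX : ∀ c ∈ X, 0 ≤ c) :
    ∀ c ∈ X, c ≤ m := by
  induction k generalizing X with
  | zero => subst h; intro c hc; cases hc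
  | succ k ih =>
    obtain ⟨j, hj, hPB, hd⟩ := h
    intro c hc
    rw [← List.take_append_drop j X] at hc
    rcases List.mem_append.1 hc with h1 | h2
    · exact ih hPB (fun a ha => hX a (List.mem_of_mem_take ha)) c h1
    · have : c ≤ (X.drop j).sum :=
        mem_le_sum (fun a ha => hX a (List.mem_of_mem_drop ha)) h2
      omega

theorem V_achieve (t : Nat) : ∀ X : List Int, PB (t + 1) X (V t X) := by
  induction t with
  | zero =>
    intro X
    exact ⟨0, by simp, by simp [PB], by simp [V]⟩
  | succ t ih =>
    intro X
    have hne : ((List.range (X.length + 1)).map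
        (fun j => max (V t (X.take j)) ((X.drop j).sum))) ≠ [] := by simp
    rcases hv : PySem.List.min? ((List.range (X.length + 1)).map
        (fun j => max (V t (X.take j)) ((X.drop j).sum))) (fun x => x) with _ | v
    · exact absurd ((PySem.List.min?_eq_none_iff _ _).1 hv) hne
    · have hvmem := PySem.List.min?_mem hv
      obtain ⟨j, hjmem, hj⟩ := List.mem_map.1 hvmem
      have hjle : j ≤ X.length := by
        have := List.mem_range.1 hjmem; omega
      refine ⟨j, hjle, ?_, ?_⟩
      · have h1 := PB_mono_m (ih (X.take j)) (le_max_left (V t (X.take j)) ((X.drop j).sum))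
        rw [hj] at h1
        simpa [V, hv] using h1
      · simp only [V, hv, Option.getD_some, ← hj]
        exact le_max_right _ _

theorem V_min (t : Nat) : ∀ (X : List Int) (m : Int), PB (t + 1) X m → V t X ≤ m := by
  induction t with
  | zero =>
    intro X m h
    obtain ⟨j, hj, h0, hd⟩ := h
    rcases List.take_eq_nil_iff.1 h0 with rfl | rfl
    · simpa [V] using hd
    · simpa [V] using hd
  | succ t ih =>
    intro X m h
    obtain ⟨j, hj, hPB, hd⟩ := h
    have hjmem : j ∈ List.range (X.length + 1) := List.mem_range.2 (by omega)
    have hemem : max (V t (X.take j)) ((X.drop j).sum) ∈ (List.range (X.length + 1)).map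
        (fun j => max (V t (X.take j)) ((X.drop j).sum)) := List.mem_map.2 ⟨j, hjmem, rfl⟩
    rcases hv : PySem.List.min? ((List.range (X.length + 1)).map
        (fun j => max (V t (X.take j)) ((X.drop j).sum))) (fun x => x) with _ | v
    · rw [(PySem.List.min?_eq_none_iff _ _).1 hv] at hemem; cases hemem
    · have hle := PySem.List.min?_isMin hv _ hemem
      simp only [V, hv, Option.getD_some]
      exact le_trans hle (max_le (ih _ _ hPB) hd)

theorem parts_PB (parts : List (List Int)) (m : Int) (hm : 0 ≤ m)
    (h : ∀ p ∈ parts, List.sum p ≤ m) : PB parts.length parts.flatten m := by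
  induction parts using List.reverseRecOn with
  | nil => simp [PB]
  | append_singleton ps p ih =>
    rw [List.length_append, List.length_singleton]
    refine ⟨ps.flatten.length, by simp, ?_, ?_⟩
    · have ht : (ps ++ [p]).flatten.take ps.flatten.length = ps.flatten := by
        simp [List.flatten_append]
      rw [ht]
      exact ih (fun q hq => h q (by simp [hq]))
    · have hd : (ps ++ [p]).flatten.drop ps.flatten.length = p := by
        simp [List.flatten_append]
      rw [hd]
      exact h p (by simp)

theorem flatten_filter_ne_nil (parts : List (List Int)) :
    (parts.filter (fun p => !p.isEmpty)).flatten = parts.flatten := by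
  induction parts with
  | nil => rfl
  | cons p ps ih =>
    cases p with
    | nil => simpa using ih
    | cons x xs => simp [ih]

theorem length_filter_le_flatten (parts : List (List Int)) :
    (parts.filter (fun p => !p.isEmpty)).length ≤ parts.flatten.length := by
  induction parts with
  | nil => simp
  | cons p ps ih =>
    cases p with
    | nil => simpa using ih
    | cons x xs =>
      simp only [List.filter_cons, List.flatten_cons]
      simp only [List.isEmpty_cons, Bool.not_false, if_true, List.length_cons,
        List.length_append, List.length_cons]
      omega

theorem gsound (m : Int) (X : List Int) : ∀ cur : Int, (∀ c ∈ X, 0 ≤ c) → 0 ≤ cur → cur ≤ m →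
    (∀ c ∈ X, c ≤ m) →
    ∃ p ps, (p :: ps : List (List Int)).flatten = X ∧ ps.length = breaks m X cur ∧
      cur + p.sum ≤ m ∧ ∀ q ∈ ps, List.sum q ≤ m := by
  induction X with
  | nil =>
    intro cur _ hc hcm _
    exact ⟨[], [], by simp, by simp [breaks], by simpa, by simp⟩
  | cons f rest ih =>
    intro cur hX hc hcm hel
    have hf : 0 ≤ f := hX f (by simp)
    have hfm : f ≤ m := hel f (by simp)
    by_cases hfit : cur + f ≤ m
    · obtain ⟨p, ps, hfl, hlen, hsum, hps⟩ := ih (cur + f)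
        (fun c hc => hX c (by simp [hc])) (by omega) hfit (fun c hc => hel c (by simp [hc]))
      refine ⟨f :: p, ps, ?_, ?_, ?_, hps⟩
      · simp only [List.flatten_cons] at hfl ⊢
        simp [hfl]
      · simp [breaks, hfit, hlen]
      · simp only [List.sum_cons]; omega
    · obtain ⟨p, ps, hfl, hlen, hsum, hps⟩ := ih f
        (fun c hc => hX c (by simp [hc])) hf hfm (fun c hc => hel c (by simp [hc]))
      refine ⟨[], (f :: p) :: ps, ?_, ?_, by simpa using hcm, ?_⟩
      · simp only [List.flatten_cons] at hfl ⊢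
        simp [hfl]
      · simp [breaks, hfit, hlen]
      · intro q hq
        rcases List.mem_cons.1 hq with rfl | hq'
        · simp only [List.sum_cons]; omega
        · exact hps q hq'

theorem greedy_complete (m : Int) (k : Nat) (X : List Int) (hX : ∀ c ∈ X, 0 ≤ c)
    (h : PB (k + 1) X m) : breaks m X 0 ≤ k := by
  induction k generalizing X with
  | zero =>
    obtain ⟨j, hj, h0, hd⟩ := h
    rcases List.take_eq_nil_iff.1 h0 with rfl | rfl
    · rw [List.drop_zero] at hd
      rw [breaks_eq_zero m X 0 hX le_rfl (by omega)]
    · simp [breaks]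
  | succ k ih =>
    obtain ⟨j, hj, hPB, hd⟩ := h
    have htk : ∀ c ∈ X.take j, 0 ≤ c := fun c hc => hX c (List.mem_of_mem_take hc)
    have hdr : ∀ c ∈ X.drop j, 0 ≤ c := fun c hc => hX c (List.mem_of_mem_drop hc)
    have hs := breaks_suffix m (X.take j) (X.drop j) 0 htk hdr le_rfl hd
    rw [List.take_append_drop] at hs
    have h2 := ih (X.take j) htk hPB
    omega

-- feasible at limit m, m covers every element ⇒ PB into min(max num 1, n) groups
theorem feasible_PB (num m : Int) (l : List Int) (hl : ∀ c ∈ l, 0 ≤ c) (hm : 0 ≤ m)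
    (hel : ∀ c ∈ l, c ≤ m) (hb : 1 + (breaks m l 0 : Int) ≤ max num 1) :
    PB (min (max num 1) (l.length : Int)).toNat l m := by
  obtain ⟨p, ps, hfl, hlen, hsum, hps⟩ := gsound m l 0 hl le_rfl hm hel
  have hsums : ∀ q ∈ (p :: ps : List (List Int)).filter (fun q => !q.isEmpty), List.sum q ≤ m := by
    intro q hq
    have hq' := List.mem_of_mem_filter hq
    rcases List.mem_cons.1 hq' with rfl | hq''
    · omega
    · exact hps q hq''
  have hPB := parts_PB _ m hm hsums
  rw [flatten_filter_ne_nil, hfl] at hPB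
  refine PB_mono_k hm ?_ hPB
  have h1 : ((p :: ps : List (List Int)).filter (fun q => !q.isEmpty)).length ≤ ps.length + 1 := by
    have := List.length_filter_le (fun q => !q.isEmpty) (p :: ps)
    simpa using this
  have h2 := length_filter_le_flatten (p :: ps)
  rw [hfl] at h2
  omega

theorem canFinish_mono (num : Int) (l : List Int) (hl : ∀ c ∈ l, 0 ≤ c) :
    ∀ x y : Int, x ≤ y → canFinishAux num x l 1 0 = true → canFinishAux num y l 1 0 = true := by
  intro x y hxy hx
  rw [canFinishAux_eq] at hx ⊢
  have hm := (breaks_mono_reset x y l hl hxy).1 0 0 le_rfl le_rfl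
  simp only [decide_eq_true_eq] at hx ⊢
  omega

theorem bsearchA_spec (num : Int) (l : List Int) (hl : ∀ c ∈ l, 0 ≤ c) :
    ∀ (left right : Int), left ≤ right → canFinishAux num right l 1 0 = true →
    (canFinishAux num (bsearchA num l left right) l 1 0 = true ∧
     left ≤ bsearchA num l left right ∧ bsearchA num l left right ≤ right ∧
     ∀ x, left ≤ x → x < bsearchA num l left right → canFinishAux num x l 1 0 = false) := by
  suffices H : ∀ (fuel : Nat) (left right : Int), (right - left).toNat ≤ fuel →
      left ≤ right → canFinishAux num right l 1 0 = true →
      (canFinishAux num (bsearchA num l left right) l 1 0 = true ∧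
       left ≤ bsearchA num l left right ∧ bsearchA num l left right ≤ right ∧
       ∀ x, left ≤ x → x < bsearchA num l left right → canFinishAux num x l 1 0 = false) by
    intro left right h1 h2
    exact H (right - left).toNat left right le_rfl h1 h2
  intro fuel
  induction fuel with
  | zero =>
    intro left right hf hlr hQ
    have hnlt : ¬ left < right := by omega
    have heq : bsearchA num l left right = left := by rw [bsearchA, dif_neg hnlt]
    have hleft : left = right := by omega
    rw [heq]
    exact ⟨hleft ▸ hQ, le_rfl, hlr, fun x hx1 hx2 => absurd hx2 (by omega)⟩
  | succ fuel ih =>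
    intro left right hf hlr hQ
    by_cases h : left < right
    · have hmid1 := (PySem.Int.floordiv_lt_iff_lt_mul (a := left + right) (b := 2)
        (q := right) (by norm_num)).2 (by omega)
      have hmid2 := (PySem.Int.le_floordiv_iff_mul_le (a := left + right) (b := 2)
        (q := left) (by norm_num)).2 (by omega)
      have heq : bsearchA num l left right =
          if canFinishAux num (PySem.Int.floordiv (left + right) 2) l 1 0
          then bsearchA num l left (PySem.Int.floordiv (left + right) 2)
          else bsearchA num l (PySem.Int.floordiv (left + right) 2 + 1) right := by
        rw [bsearchA, dif_pos h]
      by_cases hq : canFinishAux num (PySem.Int.floordiv (left + right) 2) l 1 0 = true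
      · rw [heq, if_pos hq]
        obtain ⟨q1, q2, q3, q4⟩ := ih left (PySem.Int.floordiv (left + right) 2)
          (by omega) (by omega) hq
        exact ⟨q1, q2, by omega, q4⟩
      · rw [heq, if_neg hq]
        obtain ⟨q1, q2, q3, q4⟩ := ih (PySem.Int.floordiv (left + right) 2 + 1) right
          (by omega) (by omega) hQ
        refine ⟨q1, by omega, q3, ?_⟩
        intro x hx1 hx2
        by_cases hxm : x ≤ PySem.Int.floordiv (left + right) 2
        · exact Bool.eq_false_iff.2 (fun hx => hq (canFinish_mono num l hl x _ hxm hx))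
        · exact q4 x (by omega) hx2
    · have heq : bsearchA num l left right = left := by rw [bsearchA, dif_neg h]
      have hleft : left = right := by omega
      rw [heq]
      exact ⟨hleft ▸ hQ, le_rfl, hlr, fun x hx1 hx2 => absurd hx2 (by omega)⟩

-- ---- bridging the B port to V ----
def partials : Int → List Int → List Int
  | _, [] => []
  | s, c :: l => (s + c) :: partials (s + c) l

theorem foldl_build (l : List Int) : ∀ (acc : List Int) (h : acc ≠ []),
    l.foldl (fun p c => p ++ [PySem.List.pyGetD p (-1) 0 + c]) acc
      = acc ++ partials (acc.getLast h) l := by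
  induction l with
  | nil => intro acc h; simp [partials]
  | cons c rest ih =>
    intro acc h
    simp only [List.foldl_cons]
    rw [PySem.List.pyGetD_neg_one acc 0 h]
    have hne : acc ++ [acc.getLast h + c] ≠ [] := by simp
    rw [ih _ hne]
    have hlast : (acc ++ [acc.getLast h + c]).getLast hne = acc.getLast h + c := by
      simp
    rw [hlast]
    simp [partials]

theorem buildPrefix_eq (l : List Int) : buildPrefix l = 0 :: partials 0 l := by
  unfold buildPrefix
  rw [foldl_build l [0] (by simp)]
  simp

theorem partials_length (l : List Int) : ∀ s : Int, (partials s l).length = l.length := by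
  induction l with
  | nil => intro s; simp [partials]
  | cons c rest ih => intro s; simp [partials, ih]

theorem partials_getD (l : List Int) : ∀ (s : Int) (i : Nat), i < l.length →
    (partials s l).getD i 0 = s + (l.take (i + 1)).sum := by
  induction l with
  | nil => intro s i h; simp at h
  | cons c rest ih =>
    intro s i h
    cases i with
    | zero => simp [partials]
    | succ i =>
      simp only [partials, List.getD_cons_succ]
      rw [ih (s + c) i (by simpa using h)]
      simp only [List.take_succ_cons, List.sum_cons]
      ring

theorem buildPrefix_getD (l : List Int) (i : Nat) (h : i ≤ l.length) :
    (buildPrefix l).getD i 0 = (l.take i).sum := by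
  rw [buildPrefix_eq]
  cases i with
  | zero => simp
  | succ i =>
    simp only [List.getD_cons_succ]
    rw [partials_getD l 0 i (by omega)]
    simp

theorem buildPrefix_length (l : List Int) : (buildPrefix l).length = l.length + 1 := by
  rw [buildPrefix_eq]
  simp [partials_length]

theorem sum_drop_take (l : List Int) (i j : Nat) (h : j ≤ i) :
    ((l.take i).drop j).sum = (l.take i).sum - (l.take j).sum := by
  have h1 := congrArg List.sum (List.take_append_drop j (l.take i))
  rw [List.sum_append] at h1
  have h2 : (l.take i).take j = l.take j := by
    rw [List.take_take]
    congr 1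
    omega
  rw [h2] at h1
  omega

theorem dpRow_spec (l dp : List Int) (t : Nat)
    (hlen : dp.length = l.length + 1)
    (hval : ∀ i : Nat, i ≤ l.length → dp.getD i 0 = V t (l.take i)) :
    (dpRow (buildPrefix l) (l.length : Int) dp).length = l.length + 1 ∧
    ∀ i : Nat, i ≤ l.length → (dpRow (buildPrefix l) (l.length : Int) dp).getD i 0 = V (t + 1) (l.take i) := by
  have hcast : ((l.length : Int) + 1) = ((l.length + 1 : Nat) : Int) := by push_cast; ring
  constructor
  · simp only [dpRow, List.length_map, PySem.List.length_pyRange_one]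
    omega
  · intro i hi
    rw [← PySem.List.pyGetD_natCast (dpRow (buildPrefix l) (l.length : Int) dp) i 0]
    simp only [dpRow]
    rw [hcast, PySem.List.pyGetD_map_pyRange _ (l.length + 1) i 0 (by omega)]
    have hilen : (l.take i).length = i := by
      rw [List.length_take]; omega
    have hlist : (PySem.List.pyRange 0 ((i : Int) + 1)).map (fun j =>
          max (PySem.List.pyGetD dp j 0)
              (PySem.List.pyGetD (buildPrefix l) (i : Int) 0 - PySem.List.pyGetD (buildPrefix l) j 0))
        = (List.range ((l.take i).length + 1)).map
            (fun j => max (V t ((l.take i).take j)) (((l.take i).drop j).sum)) := by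
      have hcast2 : ((i : Int) + 1) = ((i + 1 : Nat) : Int) := by push_cast; ring
      rw [hcast2, PySem.List.pyRange_one, hilen]
      rw [show ((((i + 1 : Nat) : Int)) - 0).toNat = i + 1 by omega]
      rw [List.map_map]
      apply List.map_congr_left
      intro j hj
      have hji : j ≤ i := by have := List.mem_range.1 hj; omega
      simp only [Function.comp]
      rw [show ((0 : Int) + (j : Int)) = (j : Int) by ring]
      rw [PySem.List.pyGetD_natCast, PySem.List.pyGetD_natCast, PySem.List.pyGetD_natCast]
      rw [hval j (by omega), buildPrefix_getD l i hi, buildPrefix_getD l j (by omega)]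
      rw [show (l.take i).take j = l.take j by rw [List.take_take]; congr 1; omega]
      rw [sum_drop_take l i j hji]
    rw [hlist]
    rfl

theorem dp_iter (l : List Int) : ∀ (xs : List Int) (dp : List Int) (t : Nat),
    dp.length = l.length + 1 →
    (∀ i : Nat, i ≤ l.length → dp.getD i 0 = V t (l.take i)) →
    ((xs.foldl (fun d _ => dpRow (buildPrefix l) (l.length : Int) d) dp).length = l.length + 1 ∧
     ∀ i : Nat, i ≤ l.length →
       (xs.foldl (fun d _ => dpRow (buildPrefix l) (l.length : Int) d) dp).getD i 0
         = V (t + xs.length) (l.take i)) := by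
  intro xs
  induction xs with
  | nil => intro dp t h1 h2; simpa using ⟨h1, h2⟩
  | cons x xs ih =>
    intro dp t h1 h2
    obtain ⟨g1, g2⟩ := dpRow_spec l dp t h1 h2
    obtain ⟨r1, r2⟩ := ih (dpRow (buildPrefix l) (l.length : Int) dp) (t + 1) g1 g2
    refine ⟨by simpa using r1, ?_⟩
    intro i hi
    have := r2 i hi
    simp only [List.foldl_cons]
    rw [this]
    congr 1
    simp [List.length_cons]
    omega

theorem alt_eq_V (num : Int) (l : List Int) (hne : l ≠ []) :
    min_delivery_hours_alt num l = V ((min (max num 1) (l.length : Int)).toNat - 1) l := by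
  have hlen1 : 1 ≤ l.length := List.length_pos_iff.2 hne
  have hk1 : (1 : Int) ≤ min (max num 1) (l.length : Int) := by
    have : (1 : Int) ≤ (l.length : Int) := by exact_mod_cast hlen1
    omega
  simp only [min_delivery_hours_alt, if_neg hne]
  have hinit2 : ∀ i : Nat, i ≤ l.length → (buildPrefix l).getD i 0 = V 0 (l.take i) := by
    intro i hi
    rw [buildPrefix_getD l i hi]
    rfl
  obtain ⟨r1, r2⟩ := dp_iter l (PySem.List.pyRange 0 (min (max num 1) (l.length : Int) - 1))
    (buildPrefix l) 0 (buildPrefix_length l) hinit2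
  rw [PySem.List.pyGetD_natCast]
  rw [r2 l.length le_rfl]
  rw [List.take_length]
  congr 1
  rw [PySem.List.length_pyRange_one]
  omega

-- ===== VERDICT (by name: the statement is the Claim_ definition above) =====
theorem min_delivery_hours_spec : Claim_equal_min_delivery_hours := by
  intro num l hdom hpre
  unfold Spec_min_delivery_hours
  by_cases hne : l = []
  · subst hne; simp [min_delivery_hours, min_delivery_hours_alt]
  · have hl : ∀ c ∈ l, 0 ≤ c := hpre
    rcases hmax : PySem.List.max? l (fun y => y) with _ | v
    · exact absurd ((PySem.List.max?_eq_none_iff _ _).1 hmax) hne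
    have hvmem : v ∈ l := PySem.List.max?_mem hmax
    have hv0 : 0 ≤ v := hl v hvmem
    have hvs : v ≤ l.sum := mem_le_sum hl hvmem
    have hQhi : canFinishAux num l.sum l 1 0 = true := by
      rw [canFinishAux_eq]
      have h0 : breaks l.sum l 0 = 0 := breaks_eq_zero l.sum l 0 hl le_rfl (by omega)
      simp [h0]
    obtain ⟨q1, q2, q3, q4⟩ := bsearchA_spec num l hl v l.sum hvs hQhi
    set res := bsearchA num l v l.sum with hres
    set kn := (min (max num 1) (l.length : Int)).toNat with hkn
    have hlen1 : 1 ≤ l.length := List.length_pos_iff.2 hne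
    have hkn1 : 1 ≤ kn := by
      have : (1 : Int) ≤ (l.length : Int) := by exact_mod_cast hlen1
      omega
    set M := V (kn - 1) l with hM
    have hPBM : PB kn l M := by
      have := V_achieve (kn - 1) l
      rwa [Nat.sub_add_cancel hkn1] at this
    have helM : ∀ c ∈ l, c ≤ M := PB_elem_le hPBM hl
    have hloM : v ≤ M := helM v hvmem
    have hM0 : 0 ≤ M := le_trans hv0 hloM
    have hbM : breaks M l 0 ≤ kn - 1 := by
      apply greedy_complete M (kn - 1) l hl
      rwa [Nat.sub_add_cancel hkn1]
    have hQM : canFinishAux num M l 1 0 = true := by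
      rw [canFinishAux_eq]
      simp only [decide_eq_true_eq]
      omega
    have hPB1 : PB 1 l l.sum := ⟨0, by simp, by simp [PB], by simp⟩
    have hMhi : M ≤ l.sum := by
      apply V_min (kn - 1) l l.sum
      rw [Nat.sub_add_cancel hkn1]
      exact PB_mono_k (List.sum_nonneg hl) hkn1 hPB1
    have hresM : res ≤ M := by
      by_contra hcon
      push Not at hcon
      have hfalse := q4 M hloM hcon
      rw [hQM] at hfalse
      cases hfalse
    have hQres := q1
    rw [canFinishAux_eq] at hQres
    simp only [decide_eq_true_eq] at hQres
    have hbres : 1 + (breaks res l 0 : Int) ≤ max num 1 := by omega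
    have helres : ∀ c ∈ l, c ≤ res := fun c hc =>
      le_trans (PySem.List.max?_isMax hmax c hc) q2
    have hres0 : 0 ≤ res := le_trans hv0 q2
    have hMres : M ≤ res := by
      apply V_min (kn - 1) l res
      rw [Nat.sub_add_cancel hkn1]
      exact feasible_PB num res l hl hres0 helres hbres
    have hA : min_delivery_hours num l = res := by
      simp only [min_delivery_hours, if_neg hne, hmax, Option.getD_some, hres]
    rw [hA, le_antisymm hresM hMres, alt_eq_V num l hne, hM, hkn]
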